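-- pv_equiv track=rewrite | github.com/priyanshukumar0309/ADO_Notion_Sync | Fetch_Notion_Details.py | extract_headers_from_properties
-- ===== SOURCE A (Python) =====
-- def extract_headers_from_properties(properties):
--     # Define the list of prioritized headers
--     prioritized_headers = ['ADO ID', 'Name', 'Type', 'Status', 'Summary']
--
--     # Start with an empty list for headers
--     headers = []
--
--     # First, append the prioritized headers that are actually present in the properties
--     for header in prioritized_headers:
--         if header in properties:
--             headers.append(header)
--
--     # Now, add any other properties that aren't part of the prioritized headers
--     for property_name in properties.keys():
--         if property_name not in prioritized_headers and property_name not in headers: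
--             headers.append(property_name)
--
--     return headers
-- ===== SOURCE B (Python) =====
-- def extract_headers_from_properties(properties):
--     prioritized_headers = ['ADO ID', 'Name', 'Type', 'Status', 'Summary']
--     rank = {h: i for i, h in enumerate(prioritized_headers)}
--     return sorted(properties, key=lambda k: rank.get(k, len(prioritized_headers)))
-- ===== Notes on version B (the rewrite author's own statement) =====
-- stated objective: idiomatic
-- what changed: Replaces A's two sequential filtering passes (prioritized headers first, then remaining keys with a membership-in-headers test) by building a rank dict and doing one stable sort of the keys by rank, relying on sort stability for the non-prioritized tail.
import Mathlib
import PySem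

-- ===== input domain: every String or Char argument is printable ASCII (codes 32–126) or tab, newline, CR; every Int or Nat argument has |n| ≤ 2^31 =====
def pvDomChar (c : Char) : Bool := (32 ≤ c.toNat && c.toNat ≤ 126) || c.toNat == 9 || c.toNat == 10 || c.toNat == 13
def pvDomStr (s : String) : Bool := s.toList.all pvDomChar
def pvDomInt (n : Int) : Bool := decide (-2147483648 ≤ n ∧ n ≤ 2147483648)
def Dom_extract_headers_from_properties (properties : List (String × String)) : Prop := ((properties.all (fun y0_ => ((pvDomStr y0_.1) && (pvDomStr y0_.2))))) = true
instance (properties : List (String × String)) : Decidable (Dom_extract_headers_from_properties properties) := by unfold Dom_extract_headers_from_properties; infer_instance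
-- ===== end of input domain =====

-- B replaces A's two sequential filtering passes by a rank dict plus one stable sort (same result; objective: idiomatic).

-- ===== PORT A =====
def extract_headers_from_properties (properties : List (String × String)) : List String :=
  let prioritized_headers : List String := ["ADO ID", "Name", "Type", "Status", "Summary"]
  let headers : List String :=
    prioritized_headers.foldl
      (fun hs header => if (properties.map Prod.fst).contains header then hs ++ [header] else hs) []
  (properties.map Prod.fst).foldl
    (fun hs k => if ¬ prioritized_headers.contains k ∧ ¬ hs.contains k then hs ++ [k] else hs)
    headers

-- ===== PORT B =====
def extract_headers_from_properties_alt (properties : List (String × String)) : List String :=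
  let prioritized_headers : List String := ["ADO ID", "Name", "Type", "Status", "Summary"]
  let rank : PySem.Dict String Int :=
    (PySem.List.enumerate prioritized_headers).foldl (fun d p => d.insert p.2 p.1) PySem.Dict.empty
  PySem.List.sorted (properties.map Prod.fst)
    (fun k => rank.getD k (prioritized_headers.length : Int)) false

-- ===== PRECONDITION & SPEC =====
-- Pre_ excludes association lists with duplicate keys: they do not represent any Python dict
-- (A's argument is a dict, whose keys are unique), so neither program is ever run on them.
def Pre_extract_headers_from_properties (properties : List (String × String)) : Prop :=
  (properties.map Prod.fst).Nodup
instance (properties : List (String × String)) : Decidable (Pre_extract_headers_from_properties properties) := by unfold Pre_extract_headers_from_properties; infer_instance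

def pvWitness_extract_headers_from_properties : (List (String × String)) :=
  [("Name", "1"), ("custom", "2"), ("ADO ID", "3")]

def Spec_extract_headers_from_properties (properties : List (String × String)) (out : List String) : Prop := out = extract_headers_from_properties_alt properties
instance (properties : List (String × String)) (out : List String) : Decidable (Spec_extract_headers_from_properties properties out) := by unfold Spec_extract_headers_from_properties; infer_instance

-- ===== CLAIM (what is proved, stated in full; the proofs are below) =====
def Claim_equal_extract_headers_from_properties : Prop := ∀ (properties : List (String × String)), Dom_extract_headers_from_properties properties → Pre_extract_headers_from_properties properties → Spec_extract_headers_from_properties properties (extract_headers_from_properties properties)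

-- ===== LEMMAS AND PROOFS =====

-- The five prioritized headers, and B's rank key as a plain function.
def pvP : List String := ["ADO ID", "Name", "Type", "Status", "Summary"]

def pvRank (k : String) : Int :=
  if k = "ADO ID" then 0 else if k = "Name" then 1 else if k = "Type" then 2
  else if k = "Status" then 3 else if k = "Summary" then 4 else 5

theorem pvRank_eq_getD :
    (fun k => ((PySem.List.enumerate pvP).foldl
        (fun d p => d.insert p.2 p.1) PySem.Dict.empty).getD k ((pvP.length : Int)))
      = pvRank := by
  funext k
  simp [pvP, PySem.List.enumerate, PySem.Dict.getD, PySem.Dict.get?, PySem.Dict.insert,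
        PySem.Dict.empty, pvRank, List.foldl]
  split_ifs with h1 h2 h3 h4 h5
  · simp_all [List.find?, eq_comm]
  · simp_all [List.find?, eq_comm]
  · simp_all [List.find?, eq_comm]
  · simp_all [List.find?, eq_comm]
  · simp_all [List.find?, eq_comm]
  · have b1 : ("ADO ID" == k) = false := beq_eq_false_iff_ne.mpr (fun h => h1 h.symm)
    have b2 : ("Name" == k) = false := beq_eq_false_iff_ne.mpr (fun h => h2 h.symm)
    have b3 : ("Type" == k) = false := beq_eq_false_iff_ne.mpr (fun h => h3 h.symm)
    have b4 : ("Status" == k) = false := beq_eq_false_iff_ne.mpr (fun h => h4 h.symm)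
    have b5 : ("Summary" == k) = false := beq_eq_false_iff_ne.mpr (fun h => h5 h.symm)
    simp [b1, b2, b3, b4, b5]

-- insertBy facts
theorem insertBy_all_true {α : Type} (before : α → α → Bool) (x : α) (l : List α)
    (h : ∀ y ∈ l, before x y = true) :
    PySem.List.insertBy before x l = x :: l := by
  cases l with
  | nil => rfl
  | cons y t => simp [PySem.List.insertBy, h y (by simp)]

theorem insertBy_append {α : Type} (before : α → α → Bool) (x : α) (l1 l2 : List α)
    (h : ∀ y ∈ l1, before x y = false) :
    PySem.List.insertBy before x (l1 ++ l2) = l1 ++ PySem.List.insertBy before x l2 := by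
  induction l1 with
  | nil => rfl
  | cons y t ih =>
      simp [PySem.List.insertBy, h y (by simp)]
      exact ih (fun z hz => h z (by simp [hz]))

-- Inserting one element into the bucket decomposition appends it to its bucket.
theorem insert_buckets {α : Type} (key : α → Int) (x : α) (xs : List α) :
    ∀ (vs : List Int), vs.Pairwise (· < ·) → key x ∈ vs →
    PySem.List.insertBy (fun a b => decide (key a < key b)) x
        (vs.flatMap (fun v => xs.filter (fun y => key y = v)))
      = vs.flatMap (fun v => (xs ++ [x]).filter (fun y => key y = v)) := by
  intro vs
  induction vs with
  | nil => intro _ hx; simp at hx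
  | cons v vs ih =>
      intro hp hx
      have hlt : ∀ w ∈ vs, v < w := (List.pairwise_cons.mp hp).1
      have hp' : vs.Pairwise (· < ·) := (List.pairwise_cons.mp hp).2
      by_cases hkx : key x = v
      · have h1 : ∀ y ∈ xs.filter (fun y => key y = v),
            (fun a b => decide (key a < key b)) x y = false := by
          intro y hy
          have := (List.mem_filter.mp hy).2
          have : key y = v := by simpa using this
          simp [this, hkx]
        have h2 : ∀ y ∈ vs.flatMap (fun v => xs.filter (fun y => key y = v)),
            (fun a b => decide (key a < key b)) x y = true := by
          intro y hy
          rcases List.mem_flatMap.mp hy with ⟨w, hw, hyw⟩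
          have : key y = w := by simpa using (List.mem_filter.mp hyw).2
          simp [this, hkx]
          exact hlt w hw
        rw [List.flatMap_cons, insertBy_append _ _ _ _ h1, insertBy_all_true _ _ _ h2,
            List.flatMap_cons]
        have hb : (xs ++ [x]).filter (fun y => key y = v)
            = xs.filter (fun y => key y = v) ++ [x] := by
          simp [List.filter_append, hkx]
        have hrest : vs.flatMap (fun v => (xs ++ [x]).filter (fun y => key y = v))
            = vs.flatMap (fun v => xs.filter (fun y => key y = v)) := by
          apply List.flatMap_congr
          intro w hw
          have hne : key x ≠ w := by
            intro h
            have := hlt w hw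
            rw [hkx] at h
            omega
          simp [List.filter_append, hne]
        rw [hb, hrest]
        simp
      · have hx' : key x ∈ vs := by
          rcases List.mem_cons.mp hx with h | h
          · exact absurd h hkx
          · exact h
        have h1 : ∀ y ∈ xs.filter (fun y => key y = v),
            (fun a b => decide (key a < key b)) x y = false := by
          intro y hy
          have hyv : key y = v := by simpa using (List.mem_filter.mp hy).2
          have : v < key x := hlt _ hx'
          simp [hyv]; omega
        rw [List.flatMap_cons, insertBy_append _ _ _ _ h1, ih hp' hx', List.flatMap_cons]
        have hb : (xs ++ [x]).filter (fun y => key y = v)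
            = xs.filter (fun y => key y = v) := by
          simp [List.filter_append, hkx]
        rw [hb]

-- Stable sort = concatenation of the key buckets in key order.
theorem sorted_buckets {α : Type} (key : α → Int) (vs : List Int)
    (hp : vs.Pairwise (· < ·)) :
    ∀ (xs : List α), (∀ x ∈ xs, key x ∈ vs) →
    PySem.List.sorted xs key false
      = vs.flatMap (fun v => xs.filter (fun y => key y = v)) := by
  intro xs
  induction xs using List.reverseRecOn with
  | nil => intro _; simp [PySem.List.sorted]
  | append_singleton xs x ih =>
      intro h
      rw [PySem.List.sorted_eq_foldl_insertBy, List.foldl_append,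
          ← PySem.List.sorted_eq_foldl_insertBy,
          ih (fun y hy => h y (by simp [hy]))]
      simpa using insert_buckets key x xs vs hp (h x (by simp))

-- A's first loop appends the prioritized headers present.
theorem foldl_first (P keys : List String) :
    ∀ acc : List String,
    P.foldl (fun hs header => if keys.contains header then hs ++ [header] else hs) acc
      = acc ++ P.filter (fun h => keys.contains h) := by
  induction P with
  | nil => intro acc; simp
  | cons p P ih =>
      intro acc
      rw [List.foldl_cons, List.filter_cons]
      by_cases hc : keys.contains p
      · rw [if_pos hc, if_pos hc, ih]; simp
      · rw [if_neg hc, if_neg hc, ih]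

-- A's second loop appends the non-prioritized keys (nodup makes the headers test redundant).
theorem foldl_second (P : List String) :
    ∀ (keys acc : List String), keys.Nodup → (∀ x ∈ acc, x ∈ P ∨ x ∉ keys) →
    keys.foldl (fun hs k => if ¬ P.contains k ∧ ¬ hs.contains k then hs ++ [k] else hs) acc
      = acc ++ keys.filter (fun k => ¬ P.contains k) := by
  intro keys
  induction keys with
  | nil => intro acc _ _; simp
  | cons k rest ih =>
      intro acc hnd hacc
      have hknr : k ∉ rest := (List.nodup_cons.mp hnd).1
      have hnd' : rest.Nodup := (List.nodup_cons.mp hnd).2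
      by_cases hP : P.contains k
      · have : ¬ (¬ P.contains k = true ∧ ¬ acc.contains k = true) := by
          intro h; exact h.1 (by simpa using hP)
        rw [List.foldl_cons, if_neg this,
            ih acc hnd' (fun x hx => (hacc x hx).imp id (fun h hm => h (by simp [hm])))]
        have hkP : k ∈ P := by simpa using hP
        simp [List.filter_cons, hkP]
      · have hkacc : ¬ acc.contains k = true := by
          intro h
          rcases hacc k (by simpa using h) with h1 | h1
          · exact hP (by simpa using h1)
          · exact h1 (by simp)
        have hcond : (¬ P.contains k = true ∧ ¬ acc.contains k = true) := ⟨by simpa using hP, hkacc⟩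
        rw [List.foldl_cons, if_pos hcond,
            ih (acc ++ [k]) hnd' (by
              intro x hx
              rcases List.mem_append.mp hx with h1 | h1
              · exact (hacc x h1).imp id (fun h hm => h (by simp [hm]))
              · right; simpa using (by simpa using h1 : x = k) ▸ hknr)]
        have hkP : k ∉ P := by simpa using hP
        simp [List.filter_cons, hkP]

-- filter by equality on a nodup list
theorem filter_eq_single (p : String) :
    ∀ keys : List String, keys.Nodup →
    keys.filter (fun y => y = p) = if keys.contains p then [p] else [] := by
  intro keys
  induction keys with
  | nil => intro _; simp
  | cons k rest ih =>
      intro hnd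
      have hknr : k ∉ rest := (List.nodup_cons.mp hnd).1
      have ih' := ih (List.nodup_cons.mp hnd).2
      by_cases hk : k = p
      · subst hk
        have h0 : rest.contains k = false := by simpa using hknr
        simp [List.filter_cons, ih', h0, hknr]
      · have hpk : ¬ p = k := fun h => hk h.symm
        simp [List.filter_cons, hk, ih', hpk]

-- one prioritized bucket of the sort = the singleton test of A's first loop
theorem bucket_single (keys : List String) (hnd : keys.Nodup) (i : Int) (p : String)
    (hip : ∀ y, pvRank y = i ↔ y = p) :
    keys.filter (fun y => pvRank y = i) = if keys.contains p then [p] else [] := by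
  have h : ∀ y ∈ keys, (decide (pvRank y = i)) = (decide (y = p)) := fun y _ => by
    simp [hip y]
  rw [List.filter_congr h, filter_eq_single p keys hnd]

theorem pvRank0 : ∀ y, pvRank y = 0 ↔ y = "ADO ID" := by
  intro y; unfold pvRank; split_ifs <;> simp_all
theorem pvRank1 : ∀ y, pvRank y = 1 ↔ y = "Name" := by
  intro y; unfold pvRank; split_ifs <;> simp_all
theorem pvRank2 : ∀ y, pvRank y = 2 ↔ y = "Type" := by
  intro y; unfold pvRank; split_ifs <;> simp_all
theorem pvRank3 : ∀ y, pvRank y = 3 ↔ y = "Status" := by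
  intro y; unfold pvRank; split_ifs <;> simp_all
theorem pvRank4 : ∀ y, pvRank y = 4 ↔ y = "Summary" := by
  intro y; unfold pvRank; split_ifs <;> simp_all
theorem pvRank5 : ∀ y, pvRank y = 5 ↔ ¬ pvP.contains y := by
  intro y; unfold pvRank pvP; split_ifs <;> simp_all

theorem bucket_tail (keys : List String) :
    keys.filter (fun y => pvRank y = 5) = keys.filter (fun k => ¬ pvP.contains k) := by
  apply List.filter_congr
  intro y _
  simp [pvRank5 y]

-- ===== VERDICT (by name: the statement is the Claim_ definition above) =====
theorem extract_headers_from_properties_spec : Claim_equal_extract_headers_from_properties := by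
  intro properties _ hpre
  unfold Spec_extract_headers_from_properties
  unfold extract_headers_from_properties extract_headers_from_properties_alt
  simp only []
  have hpre' : (properties.map Prod.fst).Nodup := hpre
  set keys := properties.map Prod.fst with hkeys
  -- B side: rank dict = pvRank, then bucket decomposition of the stable sort
  have hkey : (fun k => ((PySem.List.enumerate ["ADO ID", "Name", "Type", "Status", "Summary"]).foldl
        (fun d p => d.insert p.2 p.1) PySem.Dict.empty).getD k
        ((["ADO ID", "Name", "Type", "Status", "Summary"] : List String).length : Int)) = pvRank := by
    have := pvRank_eq_getD
    simpa [pvP] using this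
  rw [hkey]
  have hmem : ∀ x ∈ keys, pvRank x ∈ ([0, 1, 2, 3, 4, 5] : List Int) := by
    intro x _; unfold pvRank; split_ifs <;> simp
  rw [sorted_buckets pvRank [0, 1, 2, 3, 4, 5] (by decide) keys hmem]
  -- A side: the two loops
  rw [foldl_first ["ADO ID", "Name", "Type", "Status", "Summary"] keys []]
  rw [foldl_second ["ADO ID", "Name", "Type", "Status", "Summary"] keys _ hpre'
      (by
        intro x hx
        simp only [List.nil_append] at hx
        left
        exact (List.mem_filter.mp hx).1)]
  -- rewrite each bucket
  rw [show ([0, 1, 2, 3, 4, 5] : List Int).flatMap (fun v => keys.filter (fun y => pvRank y = v))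
      = keys.filter (fun y => pvRank y = 0) ++ keys.filter (fun y => pvRank y = 1)
        ++ keys.filter (fun y => pvRank y = 2) ++ keys.filter (fun y => pvRank y = 3)
        ++ keys.filter (fun y => pvRank y = 4) ++ keys.filter (fun y => pvRank y = 5) by
    simp [List.flatMap_cons]]
  rw [bucket_single keys hpre' 0 "ADO ID" pvRank0, bucket_single keys hpre' 1 "Name" pvRank1,
      bucket_single keys hpre' 2 "Type" pvRank2, bucket_single keys hpre' 3 "Status" pvRank3,
      bucket_single keys hpre' 4 "Summary" pvRank4, bucket_tail keys]
  have hP : (["ADO ID", "Name", "Type", "Status", "Summary"] : List String) = pvP := rfl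
  rw [hP]
  simp only [pvP, List.filter_cons, List.filter_nil]
  split_ifs <;> simp
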